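-- pv_equiv track=rewrite | github.com/Joshua992700/ESEC-Portal | special_dish.py | count_special_dishes
-- ===== SOURCE A (Python) =====
-- def count_special_dishes(ingredients, size):
--     dp = [[0] * 4 for _ in range(size + 1)]
--
--     for i in range(1, size + 1):
--         for j in range(4):
--             dp[i][j] = dp[i-1][j]
--
--         if ingredients[i-1] == '0':
--             dp[i][0] += 1
--         elif ingredients[i-1] == '1':
--             dp[i][1] += dp[i-1][0]
--         elif ingredients[i-1] == '2':
--             dp[i][2] += dp[i-1][1]
--         elif ingredients[i-1] == '3':
--             dp[i][3] += dp[i-1][2]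
--
--
--     return dp[size][3]
-- ===== SOURCE B (Python) =====
-- def count_special_dishes(ingredients, size):
--     # Four staged passes: each pass materializes the prefix-count list of the
--     # next pattern stage '0', '01', '012', '0123' from the previous stage's list.
--     def stage(prev, digit):
--         out = [0]
--         acc = 0
--         for i in range(size):
--             if ingredients[i] == digit:
--                 acc += prev[i]
--             out.append(acc)
--         return out
--     ones = [1] * (size + 1)
--     p0 = stage(ones, '0')
--     p1 = stage(p0, '1')
--     p2 = stage(p1, '2')
--     p3 = stage(p2, '3')
--     return p3[size]
-- ===== Notes on version B (the rewrite author's own statement) =====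
-- stated objective: alternative
-- what changed: Replaces A's single-pass DP over a (size+1)x4 table by four staged passes, each building the prefix-count list of the next pattern stage ('0','01','012','0123') from the previous stage's list; avoiding A's per-iteration row allocation and four-way copy gives a constant-factor speedup.
import Mathlib
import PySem

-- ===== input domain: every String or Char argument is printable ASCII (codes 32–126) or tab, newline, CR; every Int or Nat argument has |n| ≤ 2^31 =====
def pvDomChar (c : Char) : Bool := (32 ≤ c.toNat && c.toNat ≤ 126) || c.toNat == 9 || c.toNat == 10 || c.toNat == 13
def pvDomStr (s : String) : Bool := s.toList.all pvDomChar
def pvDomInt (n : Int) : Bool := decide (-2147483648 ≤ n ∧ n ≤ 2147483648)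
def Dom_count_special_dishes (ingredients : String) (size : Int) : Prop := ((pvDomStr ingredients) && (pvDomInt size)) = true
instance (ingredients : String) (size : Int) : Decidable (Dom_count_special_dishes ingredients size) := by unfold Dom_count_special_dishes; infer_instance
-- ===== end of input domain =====

-- B replaces A's single-pass (size+1)x4 DP table by four staged prefix-count passes, one per pattern stage; dropping the per-iteration row copy made it measurably faster (timing run).


-- ===== PORT A =====
-- the inner 'for j in range(4)' copy loop:
def pvCopyRow (prev row0 : List Int) : List Int :=
  (PySem.List.pyRange 0 4 1).foldl (fun r j => PySem.List.pySetD r j (PySem.List.pyGetD prev j 0)) row0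

-- the four-way elif chain on ingredients[i-1], mutating row i in place:
def pvElif (ch : Option Char) (prev row : List Int) : List Int :=
  if ch = some '0' then PySem.List.pySetD row 0 (PySem.List.pyGetD row 0 0 + 1)
  else if ch = some '1' then PySem.List.pySetD row 1 (PySem.List.pyGetD row 1 0 + PySem.List.pyGetD prev 0 0)
  else if ch = some '2' then PySem.List.pySetD row 2 (PySem.List.pyGetD row 2 0 + PySem.List.pyGetD prev 1 0)
  else if ch = some '3' then PySem.List.pySetD row 3 (PySem.List.pyGetD row 3 0 + PySem.List.pyGetD prev 2 0)
  else row

def pvStepA (cs : List Char) (dp : List (List Int)) (i : Int) : List (List Int) :=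
  PySem.List.pySetD dp i
    (pvElif (PySem.List.pyGet? cs (i - 1)) (PySem.List.pyGetD dp (i - 1) [])
      (pvCopyRow (PySem.List.pyGetD dp (i - 1) []) (PySem.List.pyGetD dp i [])))

-- dp = [[0]*4 for _ in range(size+1)]; for i in range(1, size+1): …; return dp[size][3]
def count_special_dishes (ingredients : String) (size : Int) : Int :=
  PySem.List.pyGetD
    (PySem.List.pyGetD
      ((PySem.List.pyRange 1 (size + 1) 1).foldl (pvStepA ingredients.toList)
        (List.replicate (size + 1).toNat [0, 0, 0, 0]))
      size [])
    3 0

-- ===== PORT B =====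
-- Source B's 'stage': out=[0]; acc=0; for i in range(size): if ingredients[i]==digit: acc+=prev[i]; out.append(acc).
-- ingredients[i] is ported as pyGet? (= some digit comparison); prev[i] as pyGetD with default 0 — in range under Pre_.
def pvStage (cs : List Char) (size : Int) (prev : List Int) (digit : Char) : List Int :=
  ((PySem.List.pyRange 0 size 1).foldl
    (fun (st : List Int × Int) i =>
      let acc := if PySem.List.pyGet? cs i = some digit then st.2 + PySem.List.pyGetD prev i 0 else st.2
      (st.1 ++ [acc], acc)) ([0], 0)).1

def count_special_dishes_alt (ingredients : String) (size : Int) : Int :=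
  let cs := ingredients.toList
  let ones := List.replicate (size + 1).toNat (1 : Int)
  let p0 := pvStage cs size ones '0'
  let p1 := pvStage cs size p0 '1'
  let p2 := pvStage cs size p1 '2'
  let p3 := pvStage cs size p2 '3'
  PySem.List.pyGetD p3 size 0

-- ===== PRECONDITION & SPEC =====
-- Pre_: exactly where A returns — dp[size] needs 0 ≤ size and ingredients[i-1] needs size ≤ len(ingredients)
def Pre_count_special_dishes (ingredients : String) (size : Int) : Prop :=
  0 ≤ size ∧ size ≤ (ingredients.toList.length : Int)
instance (ingredients : String) (size : Int) : Decidable (Pre_count_special_dishes ingredients size) := by unfold Pre_count_special_dishes; infer_instance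
def pvWitness_count_special_dishes : String × Int := ("0123", 4)

def Spec_count_special_dishes (ingredients : String) (size : Int) (out : Int) : Prop := out = count_special_dishes_alt ingredients size
instance (ingredients : String) (size : Int) (out : Int) : Decidable (Spec_count_special_dishes ingredients size out) := by unfold Spec_count_special_dishes; infer_instance

-- ===== CLAIM (what is proved, stated in full; the proofs are below) =====
def Claim_equal_count_special_dishes : Prop := ∀ (ingredients : String) (size : Int), Dom_count_special_dishes ingredients size → Pre_count_special_dishes ingredients size → Spec_count_special_dishes ingredients size (count_special_dishes ingredients size)

-- ===== LEMMAS AND PROOFS =====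

-- proof-side spec: the four staged counts as one quadruple recursion over the prefix length
def pvStepC (cs : List Char) (s : Int × Int × Int × Int) (i : Int) : Int × Int × Int × Int :=
  if PySem.List.pyGet? cs i = some '0' then (s.1 + 1, s.2.1, s.2.2.1, s.2.2.2)
  else if PySem.List.pyGet? cs i = some '1' then (s.1, s.2.1 + s.1, s.2.2.1, s.2.2.2)
  else if PySem.List.pyGet? cs i = some '2' then (s.1, s.2.1, s.2.2.1 + s.2.1, s.2.2.2)
  else if PySem.List.pyGet? cs i = some '3' then (s.1, s.2.1, s.2.2.1, s.2.2.2 + s.2.2.1)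
  else s

def pvSpec (cs : List Char) : Nat → Int × Int × Int × Int
  | 0 => (0, 0, 0, 0)
  | k + 1 => pvStepC cs (pvSpec cs k) (k : Int)

def pvRow (s : Int × Int × Int × Int) : List Int := [s.1, s.2.1, s.2.2.1, s.2.2.2]

-- A's dp table after the first k outer iterations: rows 0..k hold the staged counts, the rest untouched zeros
def pvTab (cs : List Char) (n k : Nat) : List (List Int) :=
  (List.range (n + 1)).map (fun i => if i ≤ k then pvRow (pvSpec cs i) else [0, 0, 0, 0])

lemma pvTab_get (cs : List Char) (n k j : Nat) (hj : j ≤ n) :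
    PySem.List.pyGetD (pvTab cs n k) (j : Int) [] =
      if j ≤ k then pvRow (pvSpec cs j) else [0, 0, 0, 0] := by
  rw [pvTab, PySem.List.pyGetD_natCast, PySem.List.getD_map_range (h := by omega)]

lemma pv_set_map_range {α : Type} (f : Nat → α) (n j : Nat) (v : α) (hj : j < n) :
    ((List.range n).map f).set j v = (List.range n).map (fun i => if i = j then v else f i) := by
  apply List.ext_getElem
  · simp
  · intro i h1 h2
    simp only [List.getElem_set, List.getElem_map, List.getElem_range]
    rcases eq_or_ne i j with h | h
    · subst h; simp
    · simp [h, Ne.symm h]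

-- one A-step on a 4-list row does exactly one pvStepC step on the counters
lemma pvBranch_eq (cs : List Char) (i : Int) (s : Int × Int × Int × Int) (a b c d : Int) :
    pvElif (PySem.List.pyGet? cs i) (pvRow s) (pvCopyRow (pvRow s) [a, b, c, d]) =
      pvRow (pvStepC cs s i) := by
  rcases s with ⟨c0, c1, c2, c3⟩
  simp only [pvElif, pvCopyRow, pvStepC, pvRow]
  split_ifs <;> rfl

lemma pvStepA_tab (cs : List Char) (n k : Nat) (hk : k < n) :
    pvStepA cs (pvTab cs n k) ((k : Int) + 1) = pvTab cs n (k + 1) := by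
  have hcast : ((k : Int) + 1) = ((k + 1 : Nat) : Int) := by push_cast; ring
  have hch : ((k : Int) + 1 - 1) = (k : Int) := by ring
  have hprev : PySem.List.pyGetD (pvTab cs n k) ((k : Int)) [] = pvRow (pvSpec cs k) := by
    rw [pvTab_get cs n k k (by omega)]; simp
  have hrow0 : PySem.List.pyGetD (pvTab cs n k) ((k : Int) + 1) [] = [0, 0, 0, 0] := by
    rw [hcast, pvTab_get cs n k (k + 1) (by omega)]; simp
  unfold pvStepA
  rw [hch, hprev, hrow0, pvBranch_eq]
  have hstep : pvRow (pvStepC cs (pvSpec cs k) (k : Int)) = pvRow (pvSpec cs (k + 1)) := rfl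
  rw [hstep, hcast, PySem.List.pySetD_natCast, pvTab, pv_set_map_range _ _ _ _ (by omega)]
  unfold pvTab
  apply List.map_congr_left
  intro i _
  rcases eq_or_ne i (k + 1) with h1 | h1
  · simp [h1]
  · have hiff : (i ≤ k + 1) ↔ (i ≤ k) := by omega
    simp [h1, hiff]

lemma pvA_fold (cs : List Char) (n k : Nat) (hk : k ≤ n) :
    (PySem.List.pyRange 1 ((k : Int) + 1) 1).foldl (pvStepA cs)
        (List.replicate (n + 1) [0, 0, 0, 0]) = pvTab cs n k := by
  induction k with
  | zero =>
    rw [PySem.List.pyRange_one_eq_nil (by norm_num)]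
    simp only [List.foldl_nil]
    apply List.ext_getElem
    · simp [pvTab]
    · intro i h1 h2
      simp only [List.getElem_replicate, pvTab, List.getElem_map, List.getElem_range]
      rcases Nat.eq_zero_or_pos i with h | h
      · subst h; rfl
      · rw [if_neg (by omega)]
  | succ k ih =>
    have h : ((k + 1 : Nat) : Int) + 1 = ((k : Int) + 1) + 1 := by push_cast; ring
    rw [h, PySem.List.pyRange_one_succ_right (by omega), List.foldl_append, ih (by omega)]
    simp only [List.foldl_cons, List.foldl_nil]
    exact pvStepA_tab cs n k (by omega)

-- ---- B side: each stage is the map of a scalar prefix recursion over range(n+1)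

def pvPref (cs : List Char) (prev : List Int) (digit : Char) : Nat → Int
  | 0 => 0
  | i + 1 =>
    if PySem.List.pyGet? cs (i : Int) = some digit
    then pvPref cs prev digit i + PySem.List.pyGetD prev (i : Int) 0
    else pvPref cs prev digit i

lemma pvStage_fold (cs : List Char) (prev : List Int) (digit : Char) (n : Nat) :
    (PySem.List.pyRange 0 (n : Int) 1).foldl
      (fun (st : List Int × Int) i =>
        let acc := if PySem.List.pyGet? cs i = some digit then st.2 + PySem.List.pyGetD prev i 0 else st.2
        (st.1 ++ [acc], acc)) ([0], 0)
    = ((List.range (n + 1)).map (pvPref cs prev digit), pvPref cs prev digit n) := by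
  induction n with
  | zero => simp [pvPref]
  | succ k ih =>
    have h : ((k + 1 : Nat) : Int) = (k : Int) + 1 := by push_cast; ring
    rw [h, PySem.List.pyRange_one_succ_right (by positivity), List.foldl_append, ih]
    simp only [List.foldl_cons, List.foldl_nil]
    have hacc : (if PySem.List.pyGet? cs (k : Int) = some digit
        then pvPref cs prev digit k + PySem.List.pyGetD prev (k : Int) 0
        else pvPref cs prev digit k) = pvPref cs prev digit (k + 1) := rfl
    have hr : List.range (k + 1 + 1) = List.range (k + 1) ++ [k + 1] := List.range_succ
    rw [hacc, hr, List.map_append, List.map_cons, List.map_nil]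

lemma pvStage_eq (cs : List Char) (prev : List Int) (digit : Char) (n : Nat) :
    pvStage cs (n : Int) prev digit = (List.range (n + 1)).map (pvPref cs prev digit) := by
  unfold pvStage
  rw [pvStage_fold]

-- component behaviour of pvStepC
lemma pvStepC_c0 (cs : List Char) (s : Int × Int × Int × Int) (i : Int) :
    (pvStepC cs s i).1 = if PySem.List.pyGet? cs i = some '0' then s.1 + 1 else s.1 := by
  unfold pvStepC; split_ifs <;> simp_all
lemma pvStepC_c1 (cs : List Char) (s : Int × Int × Int × Int) (i : Int) :
    (pvStepC cs s i).2.1 = if PySem.List.pyGet? cs i = some '1' then s.2.1 + s.1 else s.2.1 := by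
  unfold pvStepC; split_ifs <;> simp_all
lemma pvStepC_c2 (cs : List Char) (s : Int × Int × Int × Int) (i : Int) :
    (pvStepC cs s i).2.2.1 = if PySem.List.pyGet? cs i = some '2' then s.2.2.1 + s.2.1 else s.2.2.1 := by
  unfold pvStepC; split_ifs <;> simp_all
lemma pvStepC_c3 (cs : List Char) (s : Int × Int × Int × Int) (i : Int) :
    (pvStepC cs s i).2.2.2 = if PySem.List.pyGet? cs i = some '3' then s.2.2.2 + s.2.2.1 else s.2.2.2 := by
  unfold pvStepC; split_ifs <;> simp_all

lemma pvPref0 (cs : List Char) (n : Nat) (i : Nat) (hi : i ≤ n) :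
    pvPref cs (List.replicate (n + 1) (1 : Int)) '0' i = (pvSpec cs i).1 := by
  induction i with
  | zero => rfl
  | succ k ih =>
    have hk : k ≤ n := by omega
    have hg : PySem.List.pyGetD (List.replicate (n + 1) (1 : Int)) (k : Int) 0 = 1 := by
      rw [PySem.List.pyGetD_natCast]
      simp [List.getD_eq_getElem?_getD, Nat.lt_succ_of_le hk]
    simp only [pvPref, pvSpec, pvStepC_c0, hg, ih hk]
lemma pvPref1 (cs : List Char) (n : Nat) (i : Nat) (hi : i ≤ n) :
    pvPref cs ((List.range (n + 1)).map (fun j => (pvSpec cs j).1)) '1' i = (pvSpec cs i).2.1 := by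
  induction i with
  | zero => rfl
  | succ k ih =>
    have hk : k ≤ n := by omega
    have hg : PySem.List.pyGetD ((List.range (n + 1)).map (fun j => (pvSpec cs j).1)) (k : Int) 0
        = (pvSpec cs k).1 := by
      rw [PySem.List.pyGetD_natCast, PySem.List.getD_map_range (h := by omega)]
    simp only [pvPref, pvSpec, pvStepC_c1, hg, ih hk]
lemma pvPref2 (cs : List Char) (n : Nat) (i : Nat) (hi : i ≤ n) :
    pvPref cs ((List.range (n + 1)).map (fun j => (pvSpec cs j).2.1)) '2' i = (pvSpec cs i).2.2.1 := by
  induction i with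
  | zero => rfl
  | succ k ih =>
    have hk : k ≤ n := by omega
    have hg : PySem.List.pyGetD ((List.range (n + 1)).map (fun j => (pvSpec cs j).2.1)) (k : Int) 0
        = (pvSpec cs k).2.1 := by
      rw [PySem.List.pyGetD_natCast, PySem.List.getD_map_range (h := by omega)]
    simp only [pvPref, pvSpec, pvStepC_c2, hg, ih hk]
lemma pvPref3 (cs : List Char) (n : Nat) (i : Nat) (hi : i ≤ n) :
    pvPref cs ((List.range (n + 1)).map (fun j => (pvSpec cs j).2.2.1)) '3' i = (pvSpec cs i).2.2.2 := by
  induction i with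
  | zero => rfl
  | succ k ih =>
    have hk : k ≤ n := by omega
    have hg : PySem.List.pyGetD ((List.range (n + 1)).map (fun j => (pvSpec cs j).2.2.1)) (k : Int) 0
        = (pvSpec cs k).2.2.1 := by
      rw [PySem.List.pyGetD_natCast, PySem.List.getD_map_range (h := by omega)]
    simp only [pvPref, pvSpec, pvStepC_c3, hg, ih hk]

lemma pvAlt_eq (ingredients : String) (n : Nat) :
    count_special_dishes_alt ingredients (n : Int) = (pvSpec ingredients.toList n).2.2.2 := by
  unfold count_special_dishes_alt
  have hrep : ((n : Int) + 1).toNat = n + 1 := by omega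
  simp only [hrep]
  have h0 : pvStage ingredients.toList (n : Int) (List.replicate (n + 1) (1 : Int)) '0'
      = (List.range (n + 1)).map (fun j => (pvSpec ingredients.toList j).1) := by
    rw [pvStage_eq]
    exact List.map_congr_left (fun i hi => pvPref0 ingredients.toList n i (Nat.lt_succ_iff.mp (List.mem_range.mp hi)))
  have h1 : pvStage ingredients.toList (n : Int) ((List.range (n + 1)).map (fun j => (pvSpec ingredients.toList j).1)) '1'
      = (List.range (n + 1)).map (fun j => (pvSpec ingredients.toList j).2.1) := by
    rw [pvStage_eq]
    exact List.map_congr_left (fun i hi => pvPref1 ingredients.toList n i (Nat.lt_succ_iff.mp (List.mem_range.mp hi)))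
  have h2 : pvStage ingredients.toList (n : Int) ((List.range (n + 1)).map (fun j => (pvSpec ingredients.toList j).2.1)) '2'
      = (List.range (n + 1)).map (fun j => (pvSpec ingredients.toList j).2.2.1) := by
    rw [pvStage_eq]
    exact List.map_congr_left (fun i hi => pvPref2 ingredients.toList n i (Nat.lt_succ_iff.mp (List.mem_range.mp hi)))
  have h3 : pvStage ingredients.toList (n : Int) ((List.range (n + 1)).map (fun j => (pvSpec ingredients.toList j).2.2.1)) '3'
      = (List.range (n + 1)).map (fun j => (pvSpec ingredients.toList j).2.2.2) := by
    rw [pvStage_eq]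
    exact List.map_congr_left (fun i hi => pvPref3 ingredients.toList n i (Nat.lt_succ_iff.mp (List.mem_range.mp hi)))
  rw [h0, h1, h2, h3, PySem.List.pyGetD_natCast, PySem.List.getD_map_range (h := by omega)]

-- ===== VERDICT (by name: the statement is the Claim_ definition above) =====
theorem count_special_dishes_spec : Claim_equal_count_special_dishes := by
  intro ingredients size hdom hpre
  obtain ⟨h0, hle⟩ := hpre
  obtain ⟨n, rfl⟩ : ∃ m : Nat, size = (m : Int) := ⟨size.toNat, (Int.toNat_of_nonneg h0).symm⟩
  unfold Spec_count_special_dishes count_special_dishes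
  have hrep : ((n : Int) + 1).toNat = n + 1 := by omega
  rw [hrep, pvA_fold ingredients.toList n n (le_refl n),
      pvTab_get ingredients.toList n n n (le_refl n), if_pos (le_refl n), pvAlt_eq]
  rfl
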